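-- pv_equiv track=rewrite | github.com/fliptrigga13/nexus-ultra | nexus_directive_pruner.py | _keyword_group
-- ===== SOURCE A (Python) =====
-- def _keyword_group(directives: list[dict]) -> list[list[dict]]:
--     """
--     Group directives by shared keywords — lightweight clustering without embeddings.
--     Returns list of groups (each group = related directives).
--     """
--     THEME_KEYWORDS = {
--         "opener":    ["opener", "open with", "start with", "first sentence"],
--         "length":    ["sentence", "length", "short", "too long", "2-4"],
--         "grounding": ["ground", "thread", "specific", "pain", "context"],
--         "veilpiercer": ["veilpiercer", "vp", "tracing", "per-step"],
--         "style":     ["em-dash", "question", "cringe", "ai tell", "marketer"],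
--         "platform":  ["reddit", "discord", "hn", "dev.to", "platform"],
--     }
--     buckets: dict[str, list[dict]] = {k: [] for k in THEME_KEYWORDS}
--     buckets["other"] = []
--
--     for d in directives:
--         text = d["content"].lower()
--         matched = False
--         for theme, kws in THEME_KEYWORDS.items():
--             if any(kw in text for kw in kws):
--                 buckets[theme].append(d)
--                 matched = True
--                 break
--         if not matched:
--             buckets["other"].append(d)
--
--     return [g for g in buckets.values() if g]
-- ===== SOURCE B (Python) =====
-- def _keyword_group(directives: list[dict]) -> list[list[dict]]:
--     """Theme-outer regrouping: pre-lower each text once, then peel off each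
--     theme's bucket from the shrinking 'remaining' list in priority order."""
--     THEMES = [
--         ["opener", "open with", "start with", "first sentence"],
--         ["sentence", "length", "short", "too long", "2-4"],
--         ["ground", "thread", "specific", "pain", "context"],
--         ["veilpiercer", "vp", "tracing", "per-step"],
--         ["em-dash", "question", "cringe", "ai tell", "marketer"],
--         ["reddit", "discord", "hn", "dev.to", "platform"],
--     ]
--     remaining = [(d, d["content"].lower()) for d in directives]
--     groups: list[list[dict]] = []
--     for kws in THEMES:
--         matched = [p for p in remaining if any(kw in p[1] for kw in kws)]
--         remaining = [p for p in remaining if not any(kw in p[1] for kw in kws)]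
--         if matched:
--             groups.append([d for d, _ in matched])
--     if remaining:
--         groups.append([d for d, _ in remaining])
--     return groups
-- ===== Notes on version B (the rewrite author's own statement) =====
-- stated objective: alternative
-- what changed: Inverted traversal: instead of A's directive-outer loop that classifies each directive against the themes with a break and appends into a pre-built dict of buckets, B lowers each text once, then loops theme-outer, splitting a shrinking 'remaining' list into this theme's bucket and the rest, appending non-empty buckets as it goes; no dict and no per-directive break logic.
import Mathlib
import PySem

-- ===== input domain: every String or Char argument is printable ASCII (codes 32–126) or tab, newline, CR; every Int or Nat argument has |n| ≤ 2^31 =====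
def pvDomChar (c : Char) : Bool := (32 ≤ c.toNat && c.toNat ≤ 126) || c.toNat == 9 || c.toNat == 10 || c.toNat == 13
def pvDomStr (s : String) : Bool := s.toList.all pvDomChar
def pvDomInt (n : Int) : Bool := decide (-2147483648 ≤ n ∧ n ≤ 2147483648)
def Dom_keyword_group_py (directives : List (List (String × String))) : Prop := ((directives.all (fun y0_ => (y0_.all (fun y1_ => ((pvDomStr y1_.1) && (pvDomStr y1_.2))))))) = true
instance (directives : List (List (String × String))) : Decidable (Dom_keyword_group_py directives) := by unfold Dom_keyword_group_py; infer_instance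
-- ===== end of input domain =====

-- B changes the decomposition only (theme-outer peeling of a shrinking 'remaining' list,
-- no dict of buckets); same results, no speed claim.

-- ===== PORT A =====
-- THEME_KEYWORDS: Python dict literal with distinct keys, kept in insertion order
def pvThemeKeywords : List (String × List String) :=
  [("opener", ["opener", "open with", "start with", "first sentence"]),
   ("length", ["sentence", "length", "short", "too long", "2-4"]),
   ("grounding", ["ground", "thread", "specific", "pain", "context"]),
   ("veilpiercer", ["veilpiercer", "vp", "tracing", "per-step"]),
   ("style", ["em-dash", "question", "cringe", "ai tell", "marketer"]),
   ("platform", ["reddit", "discord", "hn", "dev.to", "platform"])]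

-- A's inner 'for theme, kws in THEME_KEYWORDS.items(): … break' loop:
-- the first theme whose keyword list has a hit in text (none ↔ 'matched' stays False)
def pvFirstTheme : List (String × List String) → String → Option String
  | [], _ => none
  | (theme, kws) :: rest, text =>
      if kws.any (fun kw => PySem.Str.isIn kw text) then some theme
      else pvFirstTheme rest text

-- the body of A's 'for d in directives' loop
def pvStepA (buckets : PySem.Dict String (List (List (String × String))))
    (d : List (String × String)) : PySem.Dict String (List (List (String × String))) :=
  -- d["content"] raises KeyError when the key is absent (excluded by Pre_); lookup = first match
  let text := PySem.Str.lower ((d.lookup "content").getD "")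
  match pvFirstTheme pvThemeKeywords text with
  | some theme => buckets.modify theme [] (fun g => g ++ [d])   -- buckets[theme].append(d)
  | none => buckets.modify "other" [] (fun g => g ++ [d])       -- buckets["other"].append(d)

def keyword_group_py (directives : List (List (String × String))) :
    List (List (List (String × String))) :=
  -- buckets = {k: [] for k in THEME_KEYWORDS}; buckets["other"] = []
  let buckets0 := (PySem.Dict.ofList (pvThemeKeywords.map
      (fun p => (p.1, ([] : List (List (String × String))))))).insert "other" []
  let final := directives.foldl pvStepA buckets0
  -- [g for g in buckets.values() if g]
  final.values.filter (fun g => !g.isEmpty)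

-- ===== PORT B =====
def pvThemesAlt : List (List String) :=
  [["opener", "open with", "start with", "first sentence"],
   ["sentence", "length", "short", "too long", "2-4"],
   ["ground", "thread", "specific", "pain", "context"],
   ["veilpiercer", "vp", "tracing", "per-step"],
   ["em-dash", "question", "cringe", "ai tell", "marketer"],
   ["reddit", "discord", "hn", "dev.to", "platform"]]

def pvMatches (kws : List String) (t : String) : Bool :=
  kws.any (fun kw => PySem.Str.isIn kw t)

-- the body of B's 'for kws in THEMES' loop: peel this theme's bucket off 'remaining'
def pvStepB
    (st : List (List (List (String × String))) × List (List (String × String) × String))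
    (kws : List String) :
    List (List (List (String × String))) × List (List (String × String) × String) :=
  let matched := st.2.filter (fun p => pvMatches kws p.2)
  let rest := st.2.filter (fun p => !pvMatches kws p.2)
  ((if !matched.isEmpty then st.1 ++ [matched.map Prod.fst] else st.1), rest)

def keyword_group_py_alt (directives : List (List (String × String))) :
    List (List (List (String × String))) :=
  -- remaining = [(d, d["content"].lower()) for d in directives]
  let remaining0 := directives.map (fun d => (d, PySem.Str.lower ((d.lookup "content").getD "")))
  let st := pvThemesAlt.foldl pvStepB ([], remaining0)
  if !st.2.isEmpty then st.1 ++ [st.2.map Prod.fst] else st.1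

-- ===== PRECONDITION & SPEC =====
-- Pre_ excludes exactly the inputs where A raises KeyError: a directive without a "content" key.
def Pre_keyword_group_py (directives : List (List (String × String))) : Prop :=
  (directives.all (fun d => d.any (fun p => p.1 == "content"))) = true
instance (directives : List (List (String × String))) : Decidable (Pre_keyword_group_py directives) := by unfold Pre_keyword_group_py; infer_instance

def pvWitness_keyword_group_py : (List (List (String × String))) :=
  [[("content", "Open with a short opener")], [("content", "use Reddit"), ("tag", "x")]]

def Spec_keyword_group_py (directives : List (List (String × String))) (out : List (List (List (String × String)))) : Prop := out = keyword_group_py_alt directives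
instance (directives : List (List (String × String))) (out : List (List (List (String × String)))) : Decidable (Spec_keyword_group_py directives out) := by unfold Spec_keyword_group_py; infer_instance

-- ===== CLAIM (what is proved, stated in full; the proofs are below) =====
def Claim_equal_keyword_group_py : Prop := ∀ (directives : List (List (String × String))), Dom_keyword_group_py directives → Pre_keyword_group_py directives → Spec_keyword_group_py directives (keyword_group_py directives)

-- ===== LEMMAS AND PROOFS =====

def pvK0 : List String := ["opener", "open with", "start with", "first sentence"]
def pvK1 : List String := ["sentence", "length", "short", "too long", "2-4"]
def pvK2 : List String := ["ground", "thread", "specific", "pain", "context"]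
def pvK3 : List String := ["veilpiercer", "vp", "tracing", "per-step"]
def pvK4 : List String := ["em-dash", "question", "cringe", "ai tell", "marketer"]
def pvK5 : List String := ["reddit", "discord", "hn", "dev.to", "platform"]

def pvHit (kws : List String) (d : List (String × String)) : Bool :=
  pvMatches kws (PySem.Str.lower ((d.lookup "content").getD ""))

lemma pvThemeKeywords_eq :
    pvThemeKeywords = [("opener", pvK0), ("length", pvK1), ("grounding", pvK2),
      ("veilpiercer", pvK3), ("style", pvK4), ("platform", pvK5)] := rfl

lemma pvThemesAlt_eq : pvThemesAlt = [pvK0, pvK1, pvK2, pvK3, pvK4, pvK5] := rfl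

lemma pv_filter_pairs (kws : List String) (l : List (List (String × String))) :
    (l.map (fun d => (d, PySem.Str.lower ((d.lookup "content").getD "")))).filter
        (fun p => pvMatches kws p.2)
      = (l.filter (fun d => pvHit kws d)).map
          (fun d => (d, PySem.Str.lower ((d.lookup "content").getD ""))) := by
  rw [List.filter_map]; rfl

lemma pv_filter_pairs_not (kws : List String) (l : List (List (String × String))) :
    (l.map (fun d => (d, PySem.Str.lower ((d.lookup "content").getD "")))).filter
        (fun p => !pvMatches kws p.2)
      = (l.filter (fun d => !pvHit kws d)).map
          (fun d => (d, PySem.Str.lower ((d.lookup "content").getD ""))) := by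
  rw [List.filter_map]; rfl

lemma pv_map_fst_pairs (l : List (List (String × String))) :
    (l.map (fun d => (d, PySem.Str.lower ((d.lookup "content").getD "")))).map Prod.fst = l := by
  simp [List.map_map, Function.comp_def]

lemma pvStepA_eq (b0 b1 b2 b3 b4 b5 b6 : List (List (String × String)))
    (x : List (String × String)) :
    pvStepA (PySem.Dict.mk [("opener", b0), ("length", b1), ("grounding", b2),
      ("veilpiercer", b3), ("style", b4), ("platform", b5), ("other", b6)]) x
    = PySem.Dict.mk
      [("opener", b0 ++ if pvHit pvK0 x then [x] else []),
       ("length", b1 ++ if pvHit pvK1 x && !pvHit pvK0 x then [x] else []),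
       ("grounding", b2 ++ if pvHit pvK2 x && (!pvHit pvK1 x && !pvHit pvK0 x) then [x] else []),
       ("veilpiercer", b3 ++ if pvHit pvK3 x && (!pvHit pvK2 x && (!pvHit pvK1 x && !pvHit pvK0 x)) then [x] else []),
       ("style", b4 ++ if pvHit pvK4 x && (!pvHit pvK3 x && (!pvHit pvK2 x && (!pvHit pvK1 x && !pvHit pvK0 x))) then [x] else []),
       ("platform", b5 ++ if pvHit pvK5 x && (!pvHit pvK4 x && (!pvHit pvK3 x && (!pvHit pvK2 x && (!pvHit pvK1 x && !pvHit pvK0 x)))) then [x] else []),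
       ("other", b6 ++ if !pvHit pvK5 x && (!pvHit pvK4 x && (!pvHit pvK3 x && (!pvHit pvK2 x && (!pvHit pvK1 x && !pvHit pvK0 x)))) then [x] else [])] := by
  have h : ∀ kws : List String, (kws.any (fun kw => PySem.Str.isIn kw (PySem.Str.lower ((x.lookup "content").getD "")))) = pvHit kws x := by
    intro kws; rfl
  rcases h0 : pvHit pvK0 x <;> rcases h1 : pvHit pvK1 x <;> rcases h2 : pvHit pvK2 x <;>
    rcases h3 : pvHit pvK3 x <;> rcases h4 : pvHit pvK4 x <;> rcases h5 : pvHit pvK5 x <;>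
    · simp only [pvStepA, pvThemeKeywords_eq, pvFirstTheme, h, h0, h1, h2, h3, h4, h5,
        Bool.not_true, Bool.not_false, Bool.and_true, Bool.and_false, Bool.true_and,
        Bool.false_and, if_true, if_false, List.append_nil]
      simp [PySem.Dict.modify, PySem.Dict.insert, PySem.Dict.contains, PySem.Dict.getD,
        PySem.Dict.get?]

lemma pvA_inv (xs : List (List (String × String))) :
    ∀ b0 b1 b2 b3 b4 b5 b6 : List (List (String × String)),
    xs.foldl pvStepA (PySem.Dict.mk [("opener", b0), ("length", b1), ("grounding", b2),
      ("veilpiercer", b3), ("style", b4), ("platform", b5), ("other", b6)])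
    = PySem.Dict.mk
      [("opener", b0 ++ xs.filter (fun d => pvHit pvK0 d)),
       ("length", b1 ++ xs.filter (fun d => pvHit pvK1 d && !pvHit pvK0 d)),
       ("grounding", b2 ++ xs.filter (fun d => pvHit pvK2 d && (!pvHit pvK1 d && !pvHit pvK0 d))),
       ("veilpiercer", b3 ++ xs.filter (fun d => pvHit pvK3 d && (!pvHit pvK2 d && (!pvHit pvK1 d && !pvHit pvK0 d)))),
       ("style", b4 ++ xs.filter (fun d => pvHit pvK4 d && (!pvHit pvK3 d && (!pvHit pvK2 d && (!pvHit pvK1 d && !pvHit pvK0 d))))),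
       ("platform", b5 ++ xs.filter (fun d => pvHit pvK5 d && (!pvHit pvK4 d && (!pvHit pvK3 d && (!pvHit pvK2 d && (!pvHit pvK1 d && !pvHit pvK0 d)))))),
       ("other", b6 ++ xs.filter (fun d => !pvHit pvK5 d && (!pvHit pvK4 d && (!pvHit pvK3 d && (!pvHit pvK2 d && (!pvHit pvK1 d && !pvHit pvK0 d))))))] := by
  induction xs with
  | nil => intro b0 b1 b2 b3 b4 b5 b6; simp
  | cons x xs ih =>
      intro b0 b1 b2 b3 b4 b5 b6
      rw [List.foldl_cons, pvStepA_eq, ih]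
      simp only [List.filter_cons, List.append_assoc]
      split_ifs <;> simp

-- canonical theme-outer form of the result (B's algorithm, pushed to the directive side)
def pvCanon : List (List String) → List (List (String × String)) → List (List (List (String × String)))
  | [], xs => if !xs.isEmpty then [xs] else []
  | kws :: rest, xs =>
      (if !(xs.filter (fun d => pvHit kws d)).isEmpty
        then [xs.filter (fun d => pvHit kws d)] else [])
      ++ pvCanon rest (xs.filter (fun d => !pvHit kws d))

lemma pvB_inv (ths : List (List String)) :
    ∀ (xs : List (List (String × String))) (acc : List (List (List (String × String)))),
    (let st := ths.foldl pvStepB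
        (acc, xs.map (fun d => (d, PySem.Str.lower ((d.lookup "content").getD ""))));
      if !st.2.isEmpty then st.1 ++ [st.2.map Prod.fst] else st.1)
    = acc ++ pvCanon ths xs := by
  induction ths with
  | nil =>
      intro xs acc
      simp only [List.foldl_nil, pvCanon, List.isEmpty_map, pv_map_fst_pairs]
      split <;> simp
  | cons kws rest ih =>
      intro xs acc
      simp only [List.foldl_cons, pvStepB, pv_filter_pairs, pv_filter_pairs_not,
        List.isEmpty_map, pvCanon]
      rw [ih]
      split <;> simp [List.append_assoc, List.map_map, Function.comp_def]

lemma pv_sel {α : Type} (c : Bool) (g : α) (t t' : List α) (h : t = t') :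
    (if c = true then g :: t else t) = ((if c = true then [g] else []) ++ t') := by
  cases c <;> simp [h]

-- ===== VERDICT (by name: the statement is the Claim_ definition above) =====
theorem keyword_group_py_spec : Claim_equal_keyword_group_py := by
  intro directives _ _
  unfold Spec_keyword_group_py
  simp only [keyword_group_py, keyword_group_py_alt]
  have hb : (PySem.Dict.ofList (pvThemeKeywords.map
      (fun p => (p.1, ([] : List (List (String × String))))))).insert "other" []
      = PySem.Dict.mk [("opener", []), ("length", []), ("grounding", []),
        ("veilpiercer", []), ("style", []), ("platform", []), ("other", [])] := rfl
  rw [hb, pvA_inv, pvThemesAlt_eq, pvB_inv, List.nil_append]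
  simp only [pvCanon, List.filter_filter]
  simp only [PySem.Dict.values_mk, List.map_cons, List.map_nil,
    List.filter_cons, List.filter_nil, List.nil_append]
  exact pv_sel _ _ _ _ (pv_sel _ _ _ _ (pv_sel _ _ _ _ (pv_sel _ _ _ _ (pv_sel _ _ _ _
    (pv_sel _ _ _ _ rfl)))))
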